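-- pv_equiv track=rewrite | github.com/aloix123/Korepetycje | matura2022/4.1.py | zad41
-- ===== SOURCE A (Python) =====
-- def zad41(numlist):
--     firstnunm=2137
--     for num in numlist:
--         if str(num)[0]==str(num)[-1]:
--             firstnunm=num
--             break
--     numberscount=0
--     for num in numlist:
--         if str(num)[0]==str(num)[-1]:
--             numberscount+=1
--
--
--     return (firstnunm,numberscount)
-- ===== SOURCE B (Python) =====
-- def zad41(numlist):
--     first = None
--     count = 0
--     for num in numlist:
--         s = str(num)
--         if s[0] == s[-1]:
--             if first is None:
--                 first = num
--             count += 1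
--     return (2137 if first is None else first, count)
-- ===== Notes on version B (the rewrite author's own statement) =====
-- stated objective: simpler
-- what changed: Replaces A's two separate passes (one with break to find the first match, one to count) by a single pass maintaining an optional first match and a running count, computing str(num) once per element.
import Mathlib
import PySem

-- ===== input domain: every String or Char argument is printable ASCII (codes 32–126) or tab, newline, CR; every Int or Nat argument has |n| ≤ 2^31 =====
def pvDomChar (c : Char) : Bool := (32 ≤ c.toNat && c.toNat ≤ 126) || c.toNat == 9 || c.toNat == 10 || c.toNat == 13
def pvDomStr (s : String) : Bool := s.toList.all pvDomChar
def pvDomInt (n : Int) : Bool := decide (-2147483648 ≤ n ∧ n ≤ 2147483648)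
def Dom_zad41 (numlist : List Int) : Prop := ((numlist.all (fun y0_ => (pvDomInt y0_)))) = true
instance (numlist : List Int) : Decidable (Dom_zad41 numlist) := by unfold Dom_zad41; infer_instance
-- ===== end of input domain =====

-- B replaces A's two passes (first-match-with-break, then count) by one pass with an
-- optional first match and a running count (one str per element); objective: simpler.

-- shared predicate: str(num)[0] == str(num)[-1]
def pvEnds (n : Int) : Bool :=
  let s := PySem.Int.toStr n
  PySem.Str.pyGet? s 0 == PySem.Str.pyGet? s (-1)

-- ===== PORT A =====
-- first loop of A: runs until the first match (break), firstnunm initialised to 2137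
def zad41First : List Int → Int
  | [] => 2137
  | n :: t => if pvEnds n then n else zad41First t

def zad41 (numlist : List Int) : Int × Int :=
  (zad41First numlist,
   numlist.foldl (fun c n => if pvEnds n then c + 1 else c) (0 : Int))

-- ===== PORT B =====
def zad41AltStep (st : Option Int × Int) (n : Int) : Option Int × Int :=
  if pvEnds n then (some (st.1.getD n), st.2 + 1) else st

def zad41_alt (numlist : List Int) : Int × Int :=
  let st := numlist.foldl zad41AltStep (none, (0 : Int))
  (st.1.getD 2137, st.2)

-- ===== PRECONDITION & SPEC =====
def Spec_zad41 (numlist : List Int) (out : Int × Int) : Prop := out = zad41_alt numlist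
instance (numlist : List Int) (out : Int × Int) : Decidable (Spec_zad41 numlist out) := by unfold Spec_zad41; infer_instance

-- ===== CLAIM (what is proved, stated in full; the proofs are below) =====
def Claim_equal_zad41 : Prop := ∀ (numlist : List Int), Dom_zad41 numlist → Spec_zad41 numlist (zad41 numlist)

-- ===== LEMMAS AND PROOFS =====

lemma countFold_acc (l : List Int) (c : Int) :
    l.foldl (fun c n => if pvEnds n then c + 1 else c) c
      = c + l.foldl (fun c n => if pvEnds n then c + 1 else c) 0 := by
  induction l generalizing c with
  | nil => simp
  | cons h t ih =>
    simp only [List.foldl_cons]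
    rw [ih, ih (if pvEnds h then 0 + 1 else 0)]
    split_ifs <;> ring

lemma altFold_some (l : List Int) (f c : Int) :
    l.foldl zad41AltStep (some f, c)
      = (some f, c + l.foldl (fun c n => if pvEnds n then c + 1 else c) 0) := by
  induction l generalizing c with
  | nil => simp
  | cons h t ih =>
    simp only [List.foldl_cons, zad41AltStep]
    by_cases hp : pvEnds h
    · rw [if_pos hp, if_pos hp]
      simp only [Option.getD_some]
      rw [ih, countFold_acc t (0 + 1)]
      simp only [Prod.mk.injEq, true_and]
      ring
    · rw [if_neg hp, if_neg hp, ih]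

lemma altFold_none (l : List Int) (c : Int) :
    l.foldl zad41AltStep (none, c)
      = ((l.find? pvEnds), c + l.foldl (fun c n => if pvEnds n then c + 1 else c) 0) := by
  induction l generalizing c with
  | nil => simp
  | cons h t ih =>
    by_cases hp : pvEnds h
    · simp only [List.foldl_cons, zad41AltStep, if_pos hp, List.find?_cons_of_pos hp,
        Option.getD_none]
      rw [altFold_some, countFold_acc t (0 + 1)]
      simp only [Prod.mk.injEq, true_and]
      ring
    · simp only [List.foldl_cons, zad41AltStep, if_neg hp, List.find?_cons_of_neg hp]
      rw [ih]

lemma first_eq_find (l : List Int) :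
    zad41First l = (l.find? pvEnds).getD 2137 := by
  induction l with
  | nil => simp [zad41First]
  | cons h t ih =>
    simp only [zad41First, List.find?]
    by_cases hp : pvEnds h
    · simp [hp]
    · simp [hp, ih]

-- ===== VERDICT (by name: the statement is the Claim_ definition above) =====
theorem zad41_spec : Claim_equal_zad41 := by
  intro numlist _
  show zad41 numlist = zad41_alt numlist
  simp only [zad41, zad41_alt, altFold_none, first_eq_find, zero_add]
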